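-- pv_equiv track=rewrite | github.com/caymazcihan/site | ProgramO 36/app.py | find_difficult_times
-- ===== SOURCE A (Python) =====
-- def find_difficult_times(teacher_avail, open_hours_by_day):
--     """
--     Öğretmenlerin müsaitlik bilgilerine göre, en zor zaman dilimlerini belirler.
--     En zor zaman dilimleri, en az öğretmenin müsait olduğu saatlerdir.
--
--     Args:
--         teacher_avail (dict): Öğretmenlerin müsaitlik bilgisi.
--         open_hours_by_day (dict): Günlere göre açık saatler.
--
--     Returns:
--         list: En zor zaman dilimlerinin listesi.
--     """
--     time_load = {}
--
--     # Zor zaman dilimlerini belirlemek için her gün ve saat üzerinde döngü kuruyoruz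
--     for day, hours in open_hours_by_day.items():
--         for hour in hours:
--             time_load[(day, hour)] = 0
--             # Öğretmenlerin müsaitlik bilgisi üzerinden her saat için yük hesaplama
--             for teacher_id in teacher_avail:
--                 if (
--                     day in teacher_avail[teacher_id]
--                     and hour in teacher_avail[teacher_id][day]
--                 ):
--                     if teacher_avail[teacher_id][day][hour]:
--                         time_load[(day, hour)] += 1
--
--     sorted_time_load = sorted(time_load.items(), key=lambda item: item[1])
--     difficult_times = [(day, hour) for (day, hour), load in sorted_time_load]
--
--     return difficult_times
-- ===== SOURCE B (Python) =====
-- def find_difficult_times(teacher_avail, open_hours_by_day):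
--     # One pass over the availability data into a counter dict, then one pass over
--     # the open slots, instead of rescanning every teacher for every slot.
--     cnt = {}
--     for days in teacher_avail.values():
--         for day, hours in days.items():
--             for hour, ok in hours.items():
--                 if ok:
--                     cnt[(day, hour)] = cnt.get((day, hour), 0) + 1
--     time_load = {
--         (day, hour): cnt.get((day, hour), 0)
--         for day, hours in open_hours_by_day.items()
--         for hour in hours
--     }
--     return [slot for slot, _ in sorted(time_load.items(), key=lambda item: item[1])]
-- ===== Notes on version B (the rewrite author's own statement) =====
-- stated objective: faster
-- what changed: Instead of scanning every teacher for each open (day,hour) slot, B makes one pass over all availability entries into a counter dict keyed by (day,hour) and then looks each open slot up in it before the same stable sort.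
import Mathlib
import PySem

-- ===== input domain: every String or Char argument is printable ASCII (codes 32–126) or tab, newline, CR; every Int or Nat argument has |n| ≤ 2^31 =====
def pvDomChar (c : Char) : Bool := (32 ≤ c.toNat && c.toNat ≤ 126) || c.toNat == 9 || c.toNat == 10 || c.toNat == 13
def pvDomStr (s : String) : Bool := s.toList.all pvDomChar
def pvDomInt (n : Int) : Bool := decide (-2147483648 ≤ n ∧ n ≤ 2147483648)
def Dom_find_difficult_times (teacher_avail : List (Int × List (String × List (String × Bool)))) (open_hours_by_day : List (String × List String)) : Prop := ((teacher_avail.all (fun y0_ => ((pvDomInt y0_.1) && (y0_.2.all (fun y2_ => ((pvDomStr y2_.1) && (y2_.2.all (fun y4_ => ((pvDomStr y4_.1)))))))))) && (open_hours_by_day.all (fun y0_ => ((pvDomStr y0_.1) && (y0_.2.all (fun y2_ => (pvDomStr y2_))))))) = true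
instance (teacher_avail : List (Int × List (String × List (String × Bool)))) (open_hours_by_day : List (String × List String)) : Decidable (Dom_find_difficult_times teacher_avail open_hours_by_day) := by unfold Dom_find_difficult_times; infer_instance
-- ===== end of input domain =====

-- B replaces A's per-open-slot scan over all teachers by one pass over the
-- availability entries into a counter dict, then a lookup per open slot (objective: faster).

-- boundary conversion shared by both ports: the Python arguments are dicts (of dicts)
def pvToDicts (teacher_avail : List (Int × List (String × List (String × Bool)))) :
    PySem.Dict Int (PySem.Dict String (PySem.Dict String Bool)) :=
  PySem.Dict.ofList (teacher_avail.map (fun t =>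
    (t.1, PySem.Dict.ofList (t.2.map (fun d => (d.1, PySem.Dict.ofList d.2))))))

-- ===== PORT A =====
def find_difficult_times (teacher_avail : List (Int × List (String × List (String × Bool)))) (open_hours_by_day : List (String × List String)) : List (String × String) :=
  let ta := pvToDicts teacher_avail
  let ohd := PySem.Dict.ofList open_hours_by_day
  let time_load : PySem.Dict (String × String) Int :=
    ohd.items.foldl (fun tl p =>
      p.2.foldl (fun tl hour =>
        ta.keys.foldl (fun tl teacher_id =>
          let td := ta.getD teacher_id PySem.Dict.empty
          if td.contains p.1 && (td.getD p.1 PySem.Dict.empty).contains hour then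
            if (td.getD p.1 PySem.Dict.empty).getD hour false then
              tl.insert (p.1, hour) (tl.getD (p.1, hour) 0 + 1)
            else tl
          else tl)
        (tl.insert (p.1, hour) 0))
      tl)
    PySem.Dict.empty
  (PySem.List.sorted time_load.items (fun it => it.2) false).map (fun it => it.1)

-- ===== PORT B =====
def find_difficult_times_alt (teacher_avail : List (Int × List (String × List (String × Bool)))) (open_hours_by_day : List (String × List String)) : List (String × String) :=
  let ta := pvToDicts teacher_avail
  let cnt : PySem.Dict (String × String) Int :=
    ta.values.foldl (fun c days =>
      days.items.foldl (fun c dp =>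
        dp.2.items.foldl (fun c hp =>
          if hp.2 then c.insert (dp.1, hp.1) (c.getD (dp.1, hp.1) 0 + 1) else c)
        c)
      c)
    PySem.Dict.empty
  let ohd := PySem.Dict.ofList open_hours_by_day
  let time_load : PySem.Dict (String × String) Int :=
    ohd.items.foldl (fun tl p =>
      p.2.foldl (fun tl hour => tl.insert (p.1, hour) (cnt.getD (p.1, hour) 0)) tl)
    PySem.Dict.empty
  (PySem.List.sorted time_load.items (fun it => it.2) false).map (fun it => it.1)

-- ===== PRECONDITION & SPEC =====
def Spec_find_difficult_times (teacher_avail : List (Int × List (String × List (String × Bool)))) (open_hours_by_day : List (String × List String)) (out : List (String × String)) : Prop := out = find_difficult_times_alt teacher_avail open_hours_by_day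
instance (teacher_avail : List (Int × List (String × List (String × Bool)))) (open_hours_by_day : List (String × List String)) (out : List (String × String)) : Decidable (Spec_find_difficult_times teacher_avail open_hours_by_day out) := by unfold Spec_find_difficult_times; infer_instance

-- ===== CLAIM (what is proved, stated in full; the proofs are below) =====
def Claim_equal_find_difficult_times : Prop := ∀ (teacher_avail : List (Int × List (String × List (String × Bool)))) (open_hours_by_day : List (String × List String)), Dom_find_difficult_times teacher_avail open_hours_by_day → Spec_find_difficult_times teacher_avail open_hours_by_day (find_difficult_times teacher_avail open_hours_by_day)

-- ===== LEMMAS AND PROOFS =====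

-- A's availability test for one teacher's day-dict `days` at slot s
def condA (days : PySem.Dict String (PySem.Dict String Bool)) (s : String × String) : Bool :=
  (days.contains s.1 && (days.getD s.1 PySem.Dict.empty).contains s.2) &&
    (days.getD s.1 PySem.Dict.empty).getD s.2 false

-- the truthy (day, hour) pairs of one teacher, resp. of all teachers
def trips (days : PySem.Dict String (PySem.Dict String Bool)) : List (String × String) :=
  days.items.flatMap (fun dp => (dp.2.items.filter (fun hp => hp.2)).map (fun hp => (dp.1, hp.1)))

def availTrips (td : PySem.Dict Int (PySem.Dict String (PySem.Dict String Bool))) : List (String × String) :=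
  td.values.flatMap trips

-- the per-slot load as A computes it (scan of all teachers) and as B computes it (counter lookup)
def cntA (td : PySem.Dict Int (PySem.Dict String (PySem.Dict String Bool))) (s : String × String) : Int :=
  (td.keys.countP (fun t => condA (td.getD t PySem.Dict.empty) s) : Int)

def cntB (td : PySem.Dict Int (PySem.Dict String (PySem.Dict String Bool))) (s : String × String) : Int :=
  ((availTrips td).count s : Int)

-- common normal form of both time_load dicts, parametrised by the load function
def buildLoad (c : (String × String) → Int) (open_hours_by_day : List (String × List String)) : PySem.Dict (String × String) Int :=
  (PySem.Dict.ofList open_hours_by_day).items.foldl (fun tl p =>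
    p.2.foldl (fun tl hour => tl.insert (p.1, hour) (c (p.1, hour))) tl)
    PySem.Dict.empty

def sortRender (tl : PySem.Dict (String × String) Int) : List (String × String) :=
  (PySem.List.sorted tl.items (fun it => it.2) false).map (fun it => it.1)

lemma foldl_condInsert {α κ : Type} [BEq κ] [LawfulBEq κ] (l : List α) (p : α → Bool)
    (d : PySem.Dict κ Int) (s : κ) (v : Int) :
    l.foldl (fun tl t => if p t then tl.insert s (tl.getD s 0 + 1) else tl) (d.insert s v)
      = d.insert s (v + (l.countP p : Int)) := by
  induction l generalizing v with
  | nil => simp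
  | cons x xs ih =>
    simp only [List.foldl_cons]
    by_cases hx : p x
    · rw [if_pos hx, PySem.Dict.getD_insert_self, PySem.Dict.insert_insert_self, ih, List.countP_cons]
      congr 1; simp [hx]; ring
    · rw [if_neg hx, ih, List.countP_cons]
      congr 2; simp [hx]

lemma A_inner (td : PySem.Dict Int (PySem.Dict String (PySem.Dict String Bool)))
    (s1 s2 : String) (d : PySem.Dict (String × String) Int) :
    td.keys.foldl (fun tl teacher_id =>
        let q := td.getD teacher_id PySem.Dict.empty
        if q.contains s1 && (q.getD s1 PySem.Dict.empty).contains s2 then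
          if (q.getD s1 PySem.Dict.empty).getD s2 false then
            tl.insert (s1, s2) (tl.getD (s1, s2) 0 + 1)
          else tl
        else tl) (d.insert (s1, s2) 0)
      = d.insert (s1, s2) (cntA td (s1, s2)) := by
  rw [PySem.List.foldl_congr_mem _ _
      (fun tl t => if condA (td.getD t PySem.Dict.empty) (s1, s2) then tl.insert (s1, s2) (tl.getD (s1, s2) 0 + 1) else tl) _
      (by
        intro acc x _
        simp only [condA]
        by_cases h1 : (td.getD x PySem.Dict.empty).contains s1 <;>
          by_cases h2 : ((td.getD x PySem.Dict.empty).getD s1 PySem.Dict.empty).contains s2 <;>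
          by_cases h3 : ((td.getD x PySem.Dict.empty).getD s1 PySem.Dict.empty).getD s2 false <;>
          simp [h1, h2, h3])]
  rw [foldl_condInsert]
  simp [cntA]

lemma A_norm (teacher_avail : List (Int × List (String × List (String × Bool)))) (open_hours_by_day : List (String × List String)) :
    find_difficult_times teacher_avail open_hours_by_day
      = sortRender (buildLoad (cntA (pvToDicts teacher_avail)) open_hours_by_day) := by
  simp only [find_difficult_times, sortRender, buildLoad, A_inner]

lemma B_cnt (td : PySem.Dict Int (PySem.Dict String (PySem.Dict String Bool))) :
    td.values.foldl (fun c days =>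
      days.items.foldl (fun c dp =>
        dp.2.items.foldl (fun c hp =>
          if hp.2 then c.insert (dp.1, hp.1) (c.getD (dp.1, hp.1) 0 + 1) else c)
        c)
      c)
    PySem.Dict.empty = PySem.Dict.counter (availTrips td) := by
  rw [← PySem.Dict.foldl_insert_getD_add_one_eq_counter]
  simp only [availTrips, trips, List.foldl_flatMap, List.foldl_map,
    PySem.List.foldl_if_eq_foldl_filter]

lemma B_norm (teacher_avail : List (Int × List (String × List (String × Bool)))) (open_hours_by_day : List (String × List String)) :
    find_difficult_times_alt teacher_avail open_hours_by_day
      = sortRender (buildLoad (cntB (pvToDicts teacher_avail)) open_hours_by_day) := by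
  simp only [find_difficult_times_alt, B_cnt, PySem.Dict.getD_counter, sortRender, buildLoad, cntB]

lemma count_flatMap {α β : Type} [BEq β] (l : List α) (g : α → List β) (b : β) :
    (l.flatMap g).count b = (l.map (fun x => (g x).count b)).sum := by
  induction l with
  | nil => simp
  | cons x xs ih => simp [List.flatMap_cons, List.count_append, ih]

lemma mem_values_foldl_insert {κ ν : Type} [BEq κ] [LawfulBEq κ] (l : List (κ × ν)) (d : PySem.Dict κ ν) (v : ν)
    (h : v ∈ (l.foldl (fun d p => d.insert p.1 p.2) d).values) : v ∈ d.values ∨ v ∈ l.map (·.2) := by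
  induction l generalizing d with
  | nil => exact Or.inl (by simpa using h)
  | cons x xs ih =>
    rcases ih (d.insert x.1 x.2) h with h' | h'
    · rcases PySem.Dict.mem_values_insert d x.1 x.2 v h' with h'' | h''
      · exact Or.inr (by simp [h''])
      · exact Or.inl h''
    · exact Or.inr (by simp at h' ⊢; tauto)

lemma values_ofList_mem {κ ν : Type} [BEq κ] [LawfulBEq κ] (l : List (κ × ν)) (v : ν)
    (h : v ∈ (PySem.Dict.ofList l).values) : v ∈ l.map (·.2) := by
  have := mem_values_foldl_insert l PySem.Dict.empty v h
  simpa [PySem.Dict.empty, PySem.Dict.values] using this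

lemma getD_mem_values_or {κ ν : Type} [BEq κ] [LawfulBEq κ] (d : PySem.Dict κ ν) (k : κ) (dflt : ν) :
    d.getD k dflt ∈ d.values ∨ d.getD k dflt = dflt := by
  cases h : d.get? k with
  | none => exact Or.inr (PySem.Dict.getD_of_get?_eq_none d dflt h)
  | some w =>
    left
    rw [PySem.Dict.getD_of_get?_eq_some d dflt h]
    have := PySem.Dict.mem_items_of_get?_eq_some d h
    exact List.mem_map.mpr ⟨(k, w), this, rfl⟩

-- every teacher's dict in pvToDicts is ofList-built, hence has unique keys at both levels
lemma td_shape (teacher_avail : List (Int × List (String × List (String × Bool)))) (k : Int) :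
    ((pvToDicts teacher_avail).getD k PySem.Dict.empty).keys.Nodup ∧
      ∀ hd ∈ ((pvToDicts teacher_avail).getD k PySem.Dict.empty).values, (PySem.Dict.keys hd).Nodup := by
  generalize hg : (pvToDicts teacher_avail).getD k PySem.Dict.empty = days
  rcases hg ▸ getD_mem_values_or (pvToDicts teacher_avail) k PySem.Dict.empty with hmem | heq
  · rw [pvToDicts] at hmem
    have h2 := values_ofList_mem _ _ hmem
    rcases List.mem_map.mp h2 with ⟨p, hp, hpe⟩
    rcases List.mem_map.mp hp with ⟨t, _, rfl⟩
    simp only at hpe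
    rw [← hpe]
    refine ⟨PySem.Dict.nodup_keys_ofList _, ?_⟩
    intro hd hhd
    have h3 := values_ofList_mem _ _ hhd
    rcases List.mem_map.mp h3 with ⟨q, hq, hqe⟩
    rcases List.mem_map.mp hq with ⟨d, _, rfl⟩
    simp only at hqe
    rw [← hqe]
    exact PySem.Dict.nodup_keys_ofList _
  · rw [heq]
    exact ⟨by simp [PySem.Dict.keys, PySem.Dict.empty], by simp [PySem.Dict.values, PySem.Dict.empty]⟩

lemma per_dp (d0 : String) (hd : PySem.Dict String Bool) (s : String × String) :
    ((hd.items.filter (fun hp => hp.2)).map (fun hp => (d0, hp.1))).count s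
      = if d0 == s.1 then hd.items.countP (fun hp => hp.1 == s.2 && hp.2) else 0 := by
  rw [List.count_eq_countP, List.countP_map, List.countP_filter]
  by_cases hd0 : d0 = s.1
  · subst hd0
    rw [if_pos (by simp)]
    apply List.countP_congr
    intro p _
    obtain ⟨s1, s2⟩ := s
    simp [Prod.ext_iff]
  · rw [if_neg (by simpa using hd0)]
    apply List.countP_eq_zero.mpr
    intro p _
    obtain ⟨s1, s2⟩ := s
    simp_all [Prod.ext_iff]

lemma hour_cnt (L : List (String × Bool)) (hnd : (L.map (·.1)).Nodup) (h2 : String) :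
    L.countP (fun hp => hp.1 == h2 && hp.2)
      = if (PySem.Dict.mk L).contains h2 && (PySem.Dict.mk L).getD h2 false then 1 else 0 := by
  induction L with
  | nil => simp [PySem.Dict.contains_mk, PySem.Dict.getD_eq_get?_getD, PySem.Dict.get?]
  | cons x rest ih =>
    simp only [List.map_cons, List.nodup_cons] at hnd
    obtain ⟨hx, hrest⟩ := hnd
    rw [List.countP_cons]
    by_cases hk : x.1 = h2
    · have h0 : rest.countP (fun hp => hp.1 == h2 && hp.2) = 0 := by
        apply List.countP_eq_zero.mpr
        intro p hp
        simp only [Bool.and_eq_true, beq_iff_eq, not_and]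
        intro hcontra _
        exact absurd (List.mem_map.mpr ⟨p, hp, hcontra.trans hk.symm⟩) hx
      rw [h0]
      have hcont : (PySem.Dict.mk (x :: rest)).contains h2 = true := by
        simp [PySem.Dict.contains_mk, List.any_cons, hk]
      have hgd : (PySem.Dict.mk (x :: rest)).getD h2 false = x.2 := by
        rw [PySem.Dict.getD_eq_get?_getD]
        obtain ⟨x1, x2⟩ := x
        rw [PySem.Dict.get?_mk_cons]
        simp_all
      rw [hcont, hgd]
      by_cases hb : x.2 <;> simp [hk, hb]
    · have hcont : (PySem.Dict.mk (x :: rest)).contains h2 = (PySem.Dict.mk rest).contains h2 := by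
        simp [PySem.Dict.contains_mk, List.any_cons, hk]
      have hgd : (PySem.Dict.mk (x :: rest)).getD h2 false = (PySem.Dict.mk rest).getD h2 false := by
        rw [PySem.Dict.getD_eq_get?_getD, PySem.Dict.getD_eq_get?_getD]
        obtain ⟨x1, x2⟩ := x
        rw [PySem.Dict.get?_mk_cons]
        simp_all
      rw [hcont, hgd, ← ih hrest]
      simp [hk]

lemma trips_count_list (L : List (String × PySem.Dict String Bool))
    (hnd : (L.map (·.1)).Nodup) (hv : ∀ hd ∈ L.map (·.2), (PySem.Dict.keys hd).Nodup)
    (s : String × String) :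
    (trips (PySem.Dict.mk L)).count s = if condA (PySem.Dict.mk L) s then 1 else 0 := by
  induction L with
  | nil => simp [trips, condA, PySem.Dict.contains_mk]
  | cons x rest ih =>
    simp only [List.map_cons, List.nodup_cons] at hnd
    obtain ⟨hx, hrest⟩ := hnd
    have hitems : (PySem.Dict.mk (x :: rest)).items = x :: rest := rfl
    rw [trips]
    rw [hitems, List.flatMap_cons, List.count_append]
    have hhead := per_dp x.1 x.2 s
    have hcond : condA (PySem.Dict.mk (x :: rest)) s
        = if x.1 == s.1 then (x.2.contains s.2 && x.2.getD s.2 false) else condA (PySem.Dict.mk rest) s := by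
      by_cases hk : x.1 = s.1
      · have hcont : (PySem.Dict.mk (x :: rest)).contains s.1 = true := by
          simp [PySem.Dict.contains_mk, List.any_cons, hk]
        have hgd : (PySem.Dict.mk (x :: rest)).getD s.1 PySem.Dict.empty = x.2 := by
          rw [PySem.Dict.getD_eq_get?_getD]
          obtain ⟨x1, x2⟩ := x
          rw [PySem.Dict.get?_mk_cons]
          simp_all
        simp [condA, hcont, hgd, hk]
      · have hcont : (PySem.Dict.mk (x :: rest)).contains s.1 = (PySem.Dict.mk rest).contains s.1 := by
          simp [PySem.Dict.contains_mk, List.any_cons, hk]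
        have hgd : (PySem.Dict.mk (x :: rest)).getD s.1 PySem.Dict.empty
            = (PySem.Dict.mk rest).getD s.1 PySem.Dict.empty := by
          rw [PySem.Dict.getD_eq_get?_getD, PySem.Dict.getD_eq_get?_getD]
          obtain ⟨x1, x2⟩ := x
          rw [PySem.Dict.get?_mk_cons]
          simp_all
        simp [condA, hcont, hgd, hk]
    have hfold : (List.flatMap (fun dp => List.map (fun hp => (dp.1, hp.1)) (List.filter (fun hp => hp.2) dp.2.items)) rest) = trips (PySem.Dict.mk rest) := rfl
    rw [hfold]
    by_cases hk : x.1 = s.1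
    · have htail : (trips (PySem.Dict.mk rest)).count s = 0 := by
        rw [List.count_eq_zero]
        intro hmem
        rw [trips] at hmem
        rcases List.mem_flatMap.mp hmem with ⟨dp, hdp, hs⟩
        rcases List.mem_map.mp hs with ⟨hp, _, heq⟩
        have : dp.1 = s.1 := by rw [← heq]
        exact absurd (List.mem_map.mpr ⟨dp, hdp, this.trans hk.symm⟩) hx
      rw [hhead, htail, hcond]
      have htrue : (x.1 == s.1) = true := by simp [hk]
      simp only [htrue, if_true, Nat.add_zero]
      have hk2 : (x.2.items.map (·.1)).Nodup := by
        have := hv x.2 (by simp); simpa [PySem.Dict.keys] using this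
      exact (hour_cnt x.2.items hk2 s.2 : _)
    · have hfalse : (x.1 == s.1) = false := by simp [hk]
      rw [hhead, hcond]
      simp only [hfalse, Bool.false_eq_true, if_false, Nat.zero_add]
      exact ih hrest (fun hd hm => hv hd (by simp only [List.map_cons, List.mem_cons]; exact Or.inr hm))

lemma trips_count (days : PySem.Dict String (PySem.Dict String Bool)) (hnd : days.keys.Nodup)
    (hv : ∀ hd ∈ days.values, (PySem.Dict.keys hd).Nodup) (s : String × String) :
    (trips days).count s = if condA days s then 1 else 0 := by
  obtain ⟨L⟩ := days
  exact trips_count_list L (by simpa [PySem.Dict.keys] using hnd)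
    (fun hd hm => hv hd (by simpa [PySem.Dict.values] using hm)) s

lemma cnt_eq (teacher_avail : List (Int × List (String × List (String × Bool)))) (s : String × String) :
    cntA (pvToDicts teacher_avail) s = cntB (pvToDicts teacher_avail) s := by
  have hnd : (pvToDicts teacher_avail).keys.Nodup := by
    rw [pvToDicts]; exact PySem.Dict.nodup_keys_ofList _
  rw [cntB, availTrips, PySem.Dict.values_eq_map_keys _ hnd PySem.Dict.empty,
    count_flatMap, List.map_map]
  have hpt : ∀ k ∈ (pvToDicts teacher_avail).keys,
      ((fun days => (trips days).count s) ∘ fun k => (pvToDicts teacher_avail).getD k PySem.Dict.empty) k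
        = (fun k => if condA ((pvToDicts teacher_avail).getD k PySem.Dict.empty) s then 1 else 0) k := by
    intro k _
    exact trips_count _ (td_shape teacher_avail k).1 (td_shape teacher_avail k).2 s
  rw [List.map_congr_left hpt, cntA]
  rw [← PySem.List.sum_map_ite_one_zero_nat]

-- ===== VERDICT (by name: the statement is the Claim_ definition above) =====
theorem find_difficult_times_spec : Claim_equal_find_difficult_times := by
  intro ta ohd _
  show _ = _
  rw [A_norm, B_norm]
  congr 1
  exact congrArg (fun c => buildLoad c ohd) (funext (fun s => cnt_eq ta s))
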